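-- pv_equiv track=rewrite | github.com/suriyaelumalai08/python_Tasks | Task_class.py | Duplicate_string
-- ===== SOURCE A (Python) =====
-- def Duplicate_string(data: str) ->str:
--    """Identify duplicate characters in the given string."""
--
--    find=set()
--
--    result=[]
--
--    for i in data:
--       if i not in find:
--          find.add(i)
--       else:
--          result.append(i)
--
--    return tuple(result)
-- ===== SOURCE B (Python) =====
-- def Duplicate_string(data: str):
--    """Identify duplicate characters in the given string."""
--    first = {c: data.index(c) for c in data}
--    return tuple(c for i, c in enumerate(data) if first[c] != i)
-- ===== Notes on version B (the rewrite author's own statement) =====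
-- stated objective: alternative
-- what changed: Two staged passes instead of one evolving seen-set: pass one builds a first-occurrence index map with str.index, pass two keeps each position whose index differs from its character's first occurrence.
import Mathlib
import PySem

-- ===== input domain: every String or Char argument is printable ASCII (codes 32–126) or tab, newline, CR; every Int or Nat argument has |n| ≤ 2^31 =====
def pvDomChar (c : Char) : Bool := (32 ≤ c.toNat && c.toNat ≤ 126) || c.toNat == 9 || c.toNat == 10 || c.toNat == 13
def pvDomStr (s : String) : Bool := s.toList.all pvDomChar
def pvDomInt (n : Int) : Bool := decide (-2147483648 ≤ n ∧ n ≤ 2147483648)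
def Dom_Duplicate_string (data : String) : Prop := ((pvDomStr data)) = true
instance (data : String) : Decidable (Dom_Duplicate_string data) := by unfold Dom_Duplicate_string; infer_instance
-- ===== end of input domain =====

-- B replaces A's single-pass evolving seen-set by two staged passes: build a first-occurrence index map, then keep positions whose index differs from it (alternative decomposition, not faster).


-- ===== PORT A =====
-- for i in data: if i not in find: find.add(i) else: result.append(i)
def dupLoopA : List Char → PySem.Set Char → List Char → List Char
  | [], _, result => result
  | i :: rest, find, result =>
      if ¬ (PySem.Set.contains find i) then dupLoopA rest (PySem.Set.add find i) result
      else dupLoopA rest find (result ++ [i])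

def Duplicate_string (data : String) : List String :=
  (dupLoopA data.toList PySem.Set.empty []).map (fun c => String.ofList [c])

-- ===== PORT B =====
-- first = {c: data.index(c) for c in data}; every c comes from data, so data.index(c)
-- never raises — PySem.List.index? is some there, ported with getD 0 for totality.
def firstIdxB (data : List Char) : PySem.Dict Char Int :=
  data.foldl (fun d c => d.insert c (((PySem.List.index? data c).getD 0 : Nat) : Int)) PySem.Dict.empty

-- tuple(c for i, c in enumerate(data) if first[c] != i); first[c] never raises (c ∈ data).
def Duplicate_string_alt (data : String) : List String :=
  ((PySem.List.enumerate data.toList 0).filter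
      (fun p => (firstIdxB data.toList).getD p.2 0 != p.1)).map
    (fun p => String.ofList [p.2])

-- ===== PRECONDITION & SPEC =====
def Spec_Duplicate_string (data : String) (out : List String) : Prop := out = Duplicate_string_alt data
instance (data : String) (out : List String) : Decidable (Spec_Duplicate_string data out) := by unfold Spec_Duplicate_string; infer_instance

-- ===== CLAIM (what is proved, stated in full; the proofs are below) =====
def Claim_equal_Duplicate_string : Prop := ∀ (data : String), Dom_Duplicate_string data → Spec_Duplicate_string data (Duplicate_string data)

-- ===== LEMMAS AND PROOFS =====

-- common characterisation: the duplicates of l read with prefix pref already seen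
def gspec : List Char → List Char → List Char
  | [], _ => []
  | c :: rest, pref => (if pref.contains c then [c] else []) ++ gspec rest (pref ++ [c])

lemma loopA_eq : ∀ (l pref acc : List Char),
    dupLoopA l (PySem.Set.ofList pref) acc = acc ++ gspec l pref := by
  intro l
  induction l with
  | nil => intro pref acc; simp [dupLoopA, gspec]
  | cons c rest ih =>
    intro pref acc
    by_cases h : c ∈ pref
    · have hmem : c ∈ PySem.Set.ofList pref := (PySem.Set.mem_ofList pref c).mpr h
      have hset : PySem.Set.ofList (pref ++ [c]) = PySem.Set.ofList pref := by
        rw [PySem.Set.ofList_append_singleton, PySem.Set.add_of_mem hmem]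
      have hstep : dupLoopA (c :: rest) (PySem.Set.ofList pref) acc
          = dupLoopA rest (PySem.Set.ofList pref) (acc ++ [c]) := by
        simp [dupLoopA, h]
      rw [hstep, ← hset, ih (pref ++ [c]) (acc ++ [c])]
      simp [gspec, h]
    · have hset : PySem.Set.add (PySem.Set.ofList pref) c = PySem.Set.ofList (pref ++ [c]) :=
        (PySem.Set.ofList_append_singleton pref c).symm
      have hstep : dupLoopA (c :: rest) (PySem.Set.ofList pref) acc
          = dupLoopA rest (PySem.Set.add (PySem.Set.ofList pref) c) acc := by
        simp [dupLoopA, h]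
      rw [hstep, hset, ih (pref ++ [c]) acc]
      simp [gspec, h]

-- the dict built by B's first pass looks up the first-occurrence index for every c ∈ data
lemma firstIdxB_getD (data : List Char) (c : Char) (hc : c ∈ data) :
    (firstIdxB data).getD c 0 = (((PySem.List.index? data c).getD 0 : Nat) : Int) := by
  unfold firstIdxB
  have : ∀ (l : List Char) (d : PySem.Dict Char Int), c ∈ l →
      (l.foldl (fun d x => d.insert x (((PySem.List.index? data x).getD 0 : Nat) : Int)) d).getD c 0
        = (((PySem.List.index? data c).getD 0 : Nat) : Int) := by
    intro l
    induction l with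
    | nil => intro d h; simp at h
    | cons x rest ih =>
      intro d h
      simp only [List.foldl_cons]
      by_cases hr : c ∈ rest
      · exact ih _ hr
      · have hx : c = x := by
          rcases List.mem_cons.mp h with h1 | h1
          · exact h1
          · exact absurd h1 hr
        subst hx
        -- c not in rest: the remaining fold never touches key c
        have huntouched : ∀ (l' : List Char) (d' : PySem.Dict Char Int), c ∉ l' →
            (l'.foldl (fun d x => d.insert x (((PySem.List.index? data x).getD 0 : Nat) : Int)) d').getD c 0
              = d'.getD c 0 := by
          intro l'
          induction l' with
          | nil => intro d' _; rfl
          | cons y ys ihy =>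
            intro d' hny
            have hcy : c ≠ y := fun h => hny (h ▸ List.mem_cons_self)
            simp only [List.foldl_cons]
            rw [ihy _ (fun h => hny (List.mem_cons_of_mem _ h)), PySem.Dict.getD_insert]
            simp [hcy]
        rw [huntouched _ _ hr, PySem.Dict.getD_insert]
        simp
  exact this data PySem.Dict.empty hc

-- index? on the full string, queried for the char at position pref.length, vs prefix membership
lemma index?_head_getD (pref rest : List Char) (c : Char) :
    (PySem.List.index? (pref ++ c :: rest) c).getD 0 = pref.length ↔ c ∉ pref := by
  by_cases h : c ∈ pref
  · have heq : PySem.List.index? (pref ++ c :: rest) c = PySem.List.index? pref c :=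
      PySem.List.index?_append_of_mem _ h
    obtain ⟨k, hk⟩ := Option.isSome_iff_exists.mp ((PySem.List.index?_isSome_iff pref c).mpr h)
    obtain ⟨hlt, -, -⟩ := PySem.List.getElem_of_index?_eq_some hk
    rw [heq, hk]
    simp only [Option.getD_some]
    constructor
    · intro he; omega
    · intro hn; exact absurd h hn
  · have hre : pref ++ c :: rest = (pref ++ [c]) ++ rest := by simp
    have h1 : PySem.List.index? ((pref ++ [c]) ++ rest) c = PySem.List.index? (pref ++ [c]) c :=
      PySem.List.index?_append_of_mem _ (by simp)
    have h2 : PySem.List.index? (pref ++ [c]) c = some pref.length :=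
      PySem.List.index?_append_singleton_self pref c h
    rw [hre, h1, h2]
    simp [h]

-- B's filter over the enumerated suffix, with pref already consumed, equals gspec
lemma filterB_eq (data : List Char) : ∀ (l pref : List Char), pref ++ l = data →
    ((PySem.List.enumerate l (pref.length : Int)).filter
        (fun p => (((PySem.List.index? data p.2).getD 0 : Nat) : Int) != p.1)).map (·.2)
      = gspec l pref := by
  intro l
  induction l with
  | nil => intro pref _; simp [PySem.List.enumerate_nil, gspec]
  | cons c rest ih =>
    intro pref hdata
    rw [PySem.List.enumerate_cons]
    have hs : (pref.length : Int) + 1 = ((pref ++ [c]).length : Int) := by simp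
    have htail : ((PySem.List.enumerate rest ((pref.length : Int) + 1)).filter
          (fun p => (((PySem.List.index? data p.2).getD 0 : Nat) : Int) != p.1)).map (·.2)
        = gspec rest (pref ++ [c]) := by
      rw [hs, ih (pref ++ [c]) (by simpa using hdata)]
    by_cases h : c ∈ pref
    · have hne : (PySem.List.index? data c).getD 0 ≠ pref.length := by
        subst hdata
        intro he; exact (index?_head_getD pref rest c).mp he h
      have hpred : ((((PySem.List.index? data c).getD 0 : Nat) : Int) != (pref.length : Int)) = true := by
        simp only [bne_iff_ne, ne_eq, Int.natCast_inj]
        exact hne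
      rw [List.filter_cons_of_pos (p := fun p => (((PySem.List.index? data p.2).getD 0 : Nat) : Int) != p.1)
            (a := ((pref.length : Int), c)) hpred, List.map_cons, htail]
      simp [gspec, h]
    · have heq : (PySem.List.index? data c).getD 0 = pref.length := by
        subst hdata
        exact (index?_head_getD pref rest c).mpr h
      have hpred : ((((PySem.List.index? data c).getD 0 : Nat) : Int) != (pref.length : Int)) = false := by
        simp only [bne_eq_false_iff_eq, Int.natCast_inj]
        exact heq
      have hpred' : ¬ ((((PySem.List.index? data c).getD 0 : Nat) : Int) != (pref.length : Int)) = true := by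
        rw [hpred]; simp
      rw [List.filter_cons_of_neg (p := fun p => (((PySem.List.index? data p.2).getD 0 : Nat) : Int) != p.1)
            (a := ((pref.length : Int), c)) hpred', htail]
      simp [gspec, h]

-- ===== VERDICT (by name: the statement is the Claim_ definition above) =====
theorem Duplicate_string_spec : Claim_equal_Duplicate_string := by
  intro data _
  show Duplicate_string data = Duplicate_string_alt data
  unfold Duplicate_string Duplicate_string_alt
  have hA : dupLoopA data.toList PySem.Set.empty [] = gspec data.toList [] := by
    have := loopA_eq data.toList [] []
    simpa [PySem.Set.empty, PySem.Set.ofList] using this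
  have hfilter : (PySem.List.enumerate data.toList 0).filter
        (fun p => (firstIdxB data.toList).getD p.2 0 != p.1)
      = (PySem.List.enumerate data.toList 0).filter
        (fun p => (((PySem.List.index? data.toList p.2).getD 0 : Nat) : Int) != p.1) := by
    apply List.filter_congr
    intro p hp
    obtain ⟨k, hk, rfl⟩ := (PySem.List.mem_enumerate_iff _ _ _).mp hp
    rw [firstIdxB_getD data.toList _ (List.getElem_mem hk)]
  have hB := filterB_eq data.toList data.toList [] (by simp)
  simp only [List.length_nil, Int.natCast_zero] at hB
  rw [hA, hfilter, ← hB, List.map_map]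
  rfl
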